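-- pv_equiv track=rewrite | github.com/arielCheng218/burrito | src/train_data.py | fen_to_input
-- ===== SOURCE A (Python) =====
-- def char_value(c):
--   if c.isupper():
--     return 1
--   else:
--     return -1
--
-- def fen_to_input(fen):
--   piece_mask = []
--   k_mask = []
--   q_mask = []
--   r_mask = []
--   b_mask = []
--   n_mask = []
--   p_mask = []
--   for char in fen:
--     if char == " ":
--       break
--     if char != "/":
--       piece_mask.append(char_value(char))
--       if char == "k" or char == "K":
--         k_mask.append(char_value(char))
--       elif char == "q" or char == "Q":
--         q_mask.append(char_value(char))
--       elif char == "r" or char == "R":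
--         r_mask.append(char_value(char))
--       elif char == "b" or char == "B":
--         b_mask.append(char_value(char))
--       elif char == "n" or char == "N":
--         n_mask.append(char_value(char))
--       elif char == "p" or char == "P":
--         p_mask.append(char_value(char))
--       else:
--         for list in [piece_mask, k_mask, q_mask, r_mask, b_mask, n_mask, p_mask]:
--           for _ in range(int(char)):
--             list.append(0)
--   return piece_mask + k_mask + q_mask + r_mask + b_mask + n_mask + p_mask
-- ===== SOURCE B (Python) =====
-- PIECES = "kqrbnpKQRBNP"
--
-- def _zeros(c):
--   # zeros contributed by a non-piece char (a digit count); empty for piece letters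
--   return [] if c in PIECES else [0] * int(c)
--
-- def _piece_mask(fen):
--   out = []
--   for c in fen:
--     if c == " ":
--       break
--     if c == "/":
--       continue
--     out.append(1 if c.isupper() else -1)
--     out.extend(_zeros(c))
--   return out
--
-- def _mask(fen, lo, up):
--   out = []
--   for c in fen:
--     if c == " ":
--       break
--     if c == "/":
--       continue
--     if c == lo or c == up:
--       out.append(1 if c.isupper() else -1)
--     else:
--       out.extend(_zeros(c))
--   return out
--
-- def fen_to_input(fen):
--   out = _piece_mask(fen)
--   for lo, up in [("k","K"),("q","Q"),("r","R"),("b","B"),("n","N"),("p","P")]: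
--     out += _mask(fen, lo, up)
--   return out
-- ===== Notes on version B (the rewrite author's own statement) =====
-- stated objective: alternative
-- what changed: A builds all seven masks in one interleaved pass over the FEN with seven growing accumulators; B computes each of the seven output segments with its own independent pass (one piece-mask pass and six parameterised per-piece passes) and concatenates them, with the digit-zero logic factored into a shared helper.
import Mathlib
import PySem

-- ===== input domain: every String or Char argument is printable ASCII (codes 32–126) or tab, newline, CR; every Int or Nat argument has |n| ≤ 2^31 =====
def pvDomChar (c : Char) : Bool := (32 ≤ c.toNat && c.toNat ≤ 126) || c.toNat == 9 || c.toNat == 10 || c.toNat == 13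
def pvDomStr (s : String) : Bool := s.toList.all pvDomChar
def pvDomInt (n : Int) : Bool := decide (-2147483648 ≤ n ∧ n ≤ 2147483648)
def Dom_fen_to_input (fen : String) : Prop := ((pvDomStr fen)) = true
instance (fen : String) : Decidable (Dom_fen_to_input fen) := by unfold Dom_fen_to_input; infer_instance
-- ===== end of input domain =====

-- B replaces A's single interleaved seven-accumulator pass by seven independent passes,
-- one per output segment (alternative decomposition, same asymptotic cost).

-- ===== PORT A =====
-- char_value(c): 1 if c.isupper() else -1
def charValueA (c : Char) : Int := if PySem.Chars.isupper c then 1 else -1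

-- the loop of A: seven accumulator lists, break at space, skip rank separators, elif chain per piece
-- letter, else broadcast int(char) zeros to all seven lists.  int(char) is ported as
-- List.replicate (c.toNat - 48) 0, exact on the digit characters Pre_ admits
-- (Python raises ValueError on other chars reaching this branch; Pre_ excludes them).
def fenA_go : List Char → List Int → List Int → List Int → List Int → List Int → List Int → List Int → List Int
  | [], p, k, q, r, b, n, pp => p ++ k ++ q ++ r ++ b ++ n ++ pp
  | c :: cs, p, k, q, r, b, n, pp =>
    if c = ' ' then p ++ k ++ q ++ r ++ b ++ n ++ pp
    else if c = '/' then fenA_go cs p k q r b n pp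
    else
      let v := charValueA c
      let p' := p ++ [v]
      if c = 'k' ∨ c = 'K' then fenA_go cs p' (k ++ [v]) q r b n pp
      else if c = 'q' ∨ c = 'Q' then fenA_go cs p' k (q ++ [v]) r b n pp
      else if c = 'r' ∨ c = 'R' then fenA_go cs p' k q (r ++ [v]) b n pp
      else if c = 'b' ∨ c = 'B' then fenA_go cs p' k q r (b ++ [v]) n pp
      else if c = 'n' ∨ c = 'N' then fenA_go cs p' k q r b (n ++ [v]) pp
      else if c = 'p' ∨ c = 'P' then fenA_go cs p' k q r b n (pp ++ [v])
      else
        let z := List.replicate (c.toNat - 48) (0 : Int)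
        fenA_go cs (p' ++ z) (k ++ z) (q ++ z) (r ++ z) (b ++ z) (n ++ z) (pp ++ z)

def fen_to_input (fen : String) : List Int := fenA_go fen.toList [] [] [] [] [] [] []

-- ===== PORT B =====
def piecesB : List Char := "kqrbnpKQRBNP".toList

-- _zeros(c): [] for piece letters, else [0]*int(c) (int(c) exact on digits, see Pre_)
def zerosB (c : Char) : List Int :=
  if piecesB.contains c then [] else List.replicate (c.toNat - 48) (0 : Int)

-- _piece_mask: one pass, break at space, skip rank separators, append ±1 then extend _zeros(c)
def pieceMaskB : List Char → List Int → List Int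
  | [], out => out
  | c :: cs, out =>
    if c = ' ' then out
    else if c = '/' then pieceMaskB cs out
    else pieceMaskB cs (out ++ [if PySem.Chars.isupper c then (1 : Int) else -1] ++ zerosB c)

-- _mask(fen, lo, up): one pass, append ±1 on a match, else extend _zeros(c)
def maskB (lo up : Char) : List Char → List Int → List Int
  | [], out => out
  | c :: cs, out =>
    if c = ' ' then out
    else if c = '/' then maskB lo up cs out
    else if c = lo ∨ c = up then
      maskB lo up cs (out ++ [if PySem.Chars.isupper c then (1 : Int) else -1])
    else maskB lo up cs (out ++ zerosB c)

def fen_to_input_alt (fen : String) : List Int :=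
  let out := pieceMaskB fen.toList []
  [('k', 'K'), ('q', 'Q'), ('r', 'R'), ('b', 'B'), ('n', 'N'), ('p', 'P')].foldl
    (fun out lu => out ++ maskB lu.1 lu.2 fen.toList []) out

-- ===== PRECONDITION & SPEC =====
-- Pre_ excludes exactly the inputs on which Python A raises ValueError (int(char) applied
-- to a character before the first space that is neither a rank separator, a piece letter
-- nor a decimal digit).
-- a char the loop may see: a rank separator, a piece letter, or a decimal digit
def preCharOK (c : Char) : Bool :=
  c == '/' || "kqrbnpKQRBNP0123456789".toList.contains c
def Pre_fen_to_input (fen : String) : Prop :=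
  (fen.toList.takeWhile (· ≠ ' ')).all preCharOK = true
instance (fen : String) : Decidable (Pre_fen_to_input fen) := by unfold Pre_fen_to_input; infer_instance

def pvWitness_fen_to_input : String := "3k2/4P1 w"

def Spec_fen_to_input (fen : String) (out : List Int) : Prop := out = fen_to_input_alt fen
instance (fen : String) (out : List Int) : Decidable (Spec_fen_to_input fen out) := by unfold Spec_fen_to_input; infer_instance

-- ===== CLAIM (what is proved, stated in full; the proofs are below) =====
def Claim_equal_fen_to_input : Prop := ∀ (fen : String), Dom_fen_to_input fen → Pre_fen_to_input fen → Spec_fen_to_input fen (fen_to_input fen)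

-- ===== LEMMAS AND PROOFS =====

-- characterisations of B's passes without the accumulator (proof devices only)
def pieceF : List Char → List Int
  | [] => []
  | c :: cs =>
    if c = ' ' then []
    else if c = '/' then pieceF cs
    else ([if PySem.Chars.isupper c then (1 : Int) else -1] ++ zerosB c) ++ pieceF cs

def maskF (lo up : Char) : List Char → List Int
  | [] => []
  | c :: cs =>
    if c = ' ' then []
    else if c = '/' then maskF lo up cs
    else if c = lo ∨ c = up then
      [if PySem.Chars.isupper c then (1 : Int) else -1] ++ maskF lo up cs
    else zerosB c ++ maskF lo up cs

theorem pieceMaskB_eq (cs : List Char) (out : List Int) :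
    pieceMaskB cs out = out ++ pieceF cs := by
  induction cs generalizing out with
  | nil => simp [pieceMaskB, pieceF]
  | cons c cs ih =>
    simp only [pieceMaskB, pieceF]
    split_ifs <;> simp [ih]

theorem maskB_eq (lo up : Char) (cs : List Char) (out : List Int) :
    maskB lo up cs out = out ++ maskF lo up cs := by
  induction cs generalizing out with
  | nil => simp [maskB, maskF]
  | cons c cs ih =>
    simp only [maskB, maskF]
    split_ifs <;> simp [ih]

theorem zerosB_piece (c : Char) (h : piecesB.contains c = true) : zerosB c = [] := by
  unfold zerosB; rw [if_pos h]

theorem fenA_eq_passes (cs : List Char) (p k q r b n pp : List Int) :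
    fenA_go cs p k q r b n pp =
      p ++ pieceF cs ++ (k ++ maskF 'k' 'K' cs) ++ (q ++ maskF 'q' 'Q' cs)
      ++ (r ++ maskF 'r' 'R' cs) ++ (b ++ maskF 'b' 'B' cs)
      ++ (n ++ maskF 'n' 'N' cs) ++ (pp ++ maskF 'p' 'P' cs) := by
  induction cs generalizing p k q r b n pp with
  | nil => simp [fenA_go, pieceF, maskF]
  | cons c cs ih =>
    by_cases hsp : c = ' '
    · subst hsp; simp [fenA_go, pieceF, maskF]
    by_cases hsl : c = '/'
    · subst hsl; simp [fenA_go, pieceF, maskF, ih]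
    by_cases hk : c = 'k' ∨ c = 'K'
    · have hz : zerosB c = [] := zerosB_piece c (by rcases hk with rfl | rfl <;> decide)
      rcases hk with rfl | rfl <;> simp [fenA_go, pieceF, maskF, ih, charValueA, hz]
    by_cases hq : c = 'q' ∨ c = 'Q'
    · have hz : zerosB c = [] := zerosB_piece c (by rcases hq with rfl | rfl <;> decide)
      rcases hq with rfl | rfl <;> simp [fenA_go, pieceF, maskF, ih, charValueA, hz]
    by_cases hr : c = 'r' ∨ c = 'R'
    · have hz : zerosB c = [] := zerosB_piece c (by rcases hr with rfl | rfl <;> decide)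
      rcases hr with rfl | rfl <;> simp [fenA_go, pieceF, maskF, ih, charValueA, hz]
    by_cases hb : c = 'b' ∨ c = 'B'
    · have hz : zerosB c = [] := zerosB_piece c (by rcases hb with rfl | rfl <;> decide)
      rcases hb with rfl | rfl <;> simp [fenA_go, pieceF, maskF, ih, charValueA, hz]
    by_cases hn : c = 'n' ∨ c = 'N'
    · have hz : zerosB c = [] := zerosB_piece c (by rcases hn with rfl | rfl <;> decide)
      rcases hn with rfl | rfl <;> simp [fenA_go, pieceF, maskF, ih, charValueA, hz]
    by_cases hpw : c = 'p' ∨ c = 'P'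
    · have hz : zerosB c = [] := zerosB_piece c (by rcases hpw with rfl | rfl <;> decide)
      rcases hpw with rfl | rfl <;> simp [fenA_go, pieceF, maskF, ih, charValueA, hz]
    · have hk' := hk; have hq' := hq; have hr' := hr
      have hb' := hb; have hn' := hn; have hpw' := hpw
      push_neg at hk' hq' hr' hb' hn' hpw'
      have hcon : piecesB.contains c = false := by
        have hlit : piecesB = ['k', 'q', 'r', 'b', 'n', 'p', 'K', 'Q', 'R', 'B', 'N', 'P'] := by decide
        simp [hlit, hk'.1, hk'.2, hq'.1, hq'.2, hr'.1, hr'.2, hb'.1, hb'.2, hn'.1, hn'.2,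
          hpw'.1, hpw'.2]
      have hz : zerosB c = List.replicate (c.toNat - 48) (0 : Int) := by
        unfold zerosB; rw [if_neg (by simpa using hcon)]
      simp [fenA_go, pieceF, maskF, ih, charValueA, hsp, hsl, hk, hq, hr, hb, hn, hpw, hz]

-- ===== VERDICT (by name: the statement is the Claim_ definition above) =====
theorem fen_to_input_spec : Claim_equal_fen_to_input := by
  intro fen _ _
  unfold Spec_fen_to_input fen_to_input fen_to_input_alt
  simp [pieceMaskB_eq, maskB_eq, fenA_eq_passes]
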